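-- pv_equiv track=rewrite | github.com/ESilguero1/COTS | Python_tests/Python_neat/logic.py | BuildScanArray
-- ===== SOURCE A (Python) =====
-- def BuildScanArray(MatrixSize, step_size):
--     #Elevation
--     Rows = MatrixSize
--     row_scan_value = 0
--
--     #Azimuth
--     Columns = MatrixSize
--     col_scan_value = 0
--
--     matrix = []
--
--     for row in range(Rows):
--         matrix.append([])
--         for column in range(Columns):
--             row_scan_value = (-(Rows//2) + row) * step_size
--             col_scan_value = (-(Columns//2) + column) * step_size
--
--             matrix[row].append((col_scan_value, row_scan_value))
--
--         print (matrix[row])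
--
--     return matrix
-- ===== SOURCE B (Python) =====
-- def BuildScanArray(MatrixSize, step_size):
--     # Single flat pass over all count*count cell indices (count = number of rows);
--     # row/col recovered by integer division, then the flat list is sliced into rows.
--     count = max(MatrixSize, 0)
--     base = -(MatrixSize // 2) * step_size
--     flat = []
--     for k in range(count * count):
--         r = k // MatrixSize
--         c = k % MatrixSize
--         flat.append((base + c * step_size, base + r * step_size))
--     matrix = [flat[i * MatrixSize:(i + 1) * MatrixSize] for i in range(MatrixSize)]
--     for row in matrix:
--         print(row)
--     return matrix
-- ===== Notes on version B (the rewrite author's own statement) =====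
-- stated objective: alternative
-- what changed: B replaces A's nested row/column loops by one flat pass over all n*n cell indices, recovering each cell's row and column with k//n and k%n, then slices the flat list into the n rows.
import Mathlib
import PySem

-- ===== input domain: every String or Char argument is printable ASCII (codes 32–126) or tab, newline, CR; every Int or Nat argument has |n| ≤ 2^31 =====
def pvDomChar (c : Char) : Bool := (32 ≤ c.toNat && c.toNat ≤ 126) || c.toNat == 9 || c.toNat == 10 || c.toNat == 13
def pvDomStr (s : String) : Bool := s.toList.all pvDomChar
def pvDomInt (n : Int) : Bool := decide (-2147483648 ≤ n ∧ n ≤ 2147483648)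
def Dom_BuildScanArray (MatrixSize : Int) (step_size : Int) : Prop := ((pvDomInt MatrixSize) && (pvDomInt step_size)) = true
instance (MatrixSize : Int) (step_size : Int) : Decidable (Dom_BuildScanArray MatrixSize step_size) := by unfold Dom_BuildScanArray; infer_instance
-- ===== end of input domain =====

-- B builds all n*n cells in one flat pass keyed by index arithmetic (k//n, k%n) and slices the
-- flat list into rows (alternative algorithm). Both Pythons print each row to stdout; the
-- equivalence proved here is about the RETURN value only.

-- ===== PORT A =====
-- A: nested loops; each cell recomputes both offsets and is appended to the current (last) row.
def BuildScanArray (MatrixSize : Int) (step_size : Int) : List (List (Int × Int)) :=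
  (PySem.List.pyRange 0 MatrixSize 1).foldl (fun matrix row =>
    matrix ++ [(PySem.List.pyRange 0 MatrixSize 1).foldl (fun rowList column =>
      let row_scan_value := (-(PySem.Int.floordiv MatrixSize 2) + row) * step_size
      let col_scan_value := (-(PySem.Int.floordiv MatrixSize 2) + column) * step_size
      rowList ++ [(col_scan_value, row_scan_value)]) []]) []

-- ===== PORT B =====
-- B: one flat pass over the n*n cell indices (row = k//n, col = k%n), then slicing into rows.
def BuildScanArray_alt (MatrixSize : Int) (step_size : Int) : List (List (Int × Int)) :=
  let count := max MatrixSize 0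
  let base := -(PySem.Int.floordiv MatrixSize 2) * step_size
  let flat := (PySem.List.pyRange 0 (count * count) 1).foldl (fun flat k =>
    let r := PySem.Int.floordiv k MatrixSize
    let c := PySem.Int.mod k MatrixSize
    flat ++ [(base + c * step_size, base + r * step_size)]) []
  (PySem.List.pyRange 0 MatrixSize 1).map (fun i =>
    PySem.List.slice flat (some (i * MatrixSize)) (some ((i + 1) * MatrixSize)))

-- ===== PRECONDITION & SPEC =====
def Spec_BuildScanArray (MatrixSize : Int) (step_size : Int) (out : List (List (Int × Int))) : Prop := out = BuildScanArray_alt MatrixSize step_size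
instance (MatrixSize : Int) (step_size : Int) (out : List (List (Int × Int))) : Decidable (Spec_BuildScanArray MatrixSize step_size out) := by unfold Spec_BuildScanArray; infer_instance

-- ===== CLAIM (what is proved, stated in full; the proofs are below) =====
def Claim_equal_BuildScanArray : Prop := ∀ (MatrixSize : Int) (step_size : Int), Dom_BuildScanArray MatrixSize step_size → Spec_BuildScanArray MatrixSize step_size (BuildScanArray MatrixSize step_size)

-- ===== LEMMAS AND PROOFS =====

-- Slicing [i*N, (i+1)*N) out of a map over range (N*N) yields the map over the i-th block.
theorem pv_slice_map_range {b : Type} (f : Nat → b) (N i : Nat) (hi : i < N) :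
    PySem.List.slice ((List.range (N * N)).map f)
        (some ((i : Int) * (N : Int))) (some (((i : Int) + 1) * (N : Int)))
      = (List.range N).map (fun c => f (i * N + c)) := by
  have hN : 0 < N := by omega
  have h1 : ((i : Int) * (N : Int)) = ((i * N : Nat) : Int) := by push_cast; ring
  have h2 : (((i : Int) + 1) * (N : Int)) = (((i + 1) * N : Nat) : Int) := by push_cast; ring
  rw [h1, h2, PySem.List.slice_natCast, ← List.map_drop, ← List.map_take]
  have hs : (i + 1) * N = i * N + N := Nat.succ_mul i N
  have h3 : (i + 1) * N ≤ N * N := Nat.mul_le_mul (by omega) (Nat.le_refl N)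
  have hd : (List.range (N * N)).drop (i * N) = List.range' (i * N) (N * N - i * N) := by
    rw [List.range_eq_range', List.drop_range']; simp
  have h4 : (i + 1) * N - i * N = N := by omega
  rw [hd, h4, List.take_range'_of_length_ge (by omega), List.range'_eq_map_range, List.map_map]
  rfl

-- ===== VERDICT (by name: the statement is the Claim_ definition above) =====
theorem BuildScanArray_spec : Claim_equal_BuildScanArray := by
  intro n s _
  unfold Spec_BuildScanArray BuildScanArray BuildScanArray_alt
  by_cases hn : n ≤ 0
  · simp [PySem.List.pyRange_one_eq_nil hn]
  · have hn' : 0 < n := by omega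
    lift n to ℕ using hn'.le with N
    have hN : 0 < N := by exact_mod_cast hn'
    have hcast : (max ((N : Int)) 0 * max ((N : Int)) 0) = ((N * N : Nat) : Int) := by
      rw [max_eq_left (by positivity : (0:Int) ≤ (N : Int))]; push_cast; ring
    simp only [PySem.List.foldl_append_singleton_eq_map, List.nil_append, hcast,
      PySem.List.pyRange_one 0 ((N * N : Nat) : Int), PySem.List.pyRange_one 0 ((N : Nat) : Int),
      Int.sub_zero, Int.toNat_natCast, zero_add, List.map_map]
    apply List.map_congr_left
    intro i hi
    have hiN : i < N := List.mem_range.mp hi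
    simp only [Function.comp]
    rw [pv_slice_map_range _ N i hiN]
    apply List.map_congr_left
    intro c hc
    have hcN : c < N := List.mem_range.mp hc
    have hdivN : (i * N + c) / N = i := by
      rw [Nat.add_comm, Nat.mul_comm, Nat.add_mul_div_left _ _ hN, Nat.div_eq_of_lt hcN,
        Nat.zero_add]
    have hmodN : (i * N + c) % N = c := by
      rw [Nat.add_comm, Nat.mul_comm, Nat.add_mul_mod_self_left, Nat.mod_eq_of_lt hcN]
    simp only [Function.comp_apply]
    rw [PySem.Int.floordiv_natCast, PySem.Int.mod_natCast, hdivN, hmodN]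
    exact Prod.ext (by ring) (by ring)
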